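-- pv_equiv track=rewrite | github.com/alan-turing-institute/advent-of-code-2023 | day-06/python_cptanalatriste/part_one_boats.py | get_winning_conditions
-- ===== SOURCE A (Python) =====
-- def get_distance_by_button_hold(button_hold: int, total_time: int) -> int:
--     travel_time: int = total_time - button_hold
--     velocity: int = button_hold
--
--     return velocity * travel_time
--
-- def get_winning_conditions(
--     total_time: int, current_distance: int
-- ) -> list[int]:
--     return [
--         button_hold
--         for button_hold in range(0, total_time + 1)
--         if get_distance_by_button_hold(button_hold, total_time)
--         > current_distance
--     ]
-- ===== SOURCE B (Python) =====
-- def get_winning_conditions(total_time, current_distance):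
--     # distance b*(total_time-b) is concave and symmetric about total_time/2:
--     # binary-search the left boundary on [0, total_time//2], mirror it for the right.
--     if total_time < 0:
--         return []
--     m = total_time // 2
--     if m * (total_time - m) <= current_distance:
--         return []
--     lo, hi = 0, m
--     while lo < hi:
--         mid = (lo + hi) // 2
--         if mid * (total_time - mid) > current_distance:
--             hi = mid
--         else:
--             lo = mid + 1
--     return list(range(lo, total_time - lo + 1))
-- ===== Notes on version B (the rewrite author's own statement) =====
-- stated objective: faster
-- what changed: Replaces the O(total_time) scan of all hold times by a binary search for the left boundary of the concave distance function (mirrored by symmetry for the right boundary), emitting the winning range directly.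
import Mathlib
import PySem

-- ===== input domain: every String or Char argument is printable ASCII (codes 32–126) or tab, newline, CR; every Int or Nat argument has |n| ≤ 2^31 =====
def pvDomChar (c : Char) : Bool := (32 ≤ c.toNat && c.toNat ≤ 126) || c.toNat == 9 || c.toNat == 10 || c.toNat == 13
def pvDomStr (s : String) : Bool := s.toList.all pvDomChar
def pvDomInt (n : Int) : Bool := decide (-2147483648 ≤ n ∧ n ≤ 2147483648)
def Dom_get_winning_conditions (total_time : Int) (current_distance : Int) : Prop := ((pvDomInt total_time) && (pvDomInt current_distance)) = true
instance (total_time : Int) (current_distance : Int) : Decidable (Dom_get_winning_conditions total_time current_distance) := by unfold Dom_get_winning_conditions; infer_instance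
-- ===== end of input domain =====

-- B replaces A's O(total_time) scan by a binary search for the interval boundary
-- of the concave distance function, emitting the winning range directly (faster).

-- ===== PORT A =====
def get_distance_by_button_hold (button_hold : Int) (total_time : Int) : Int :=
  let travel_time := total_time - button_hold
  let velocity := button_hold
  velocity * travel_time

def get_winning_conditions (total_time : Int) (current_distance : Int) : List Int :=
  (PySem.List.pyRange 0 (total_time + 1) 1).filter
    (fun button_hold => decide (get_distance_by_button_hold button_hold total_time > current_distance))

-- ===== PORT B =====
-- the while loop of Source B: binary search for the least b in [lo,hi] with b*(T-b) > d
def gwcSearch (T d lo hi : Int) : Int :=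
  if h : lo < hi then
    let mid := PySem.Int.floordiv (lo + hi) 2
    if mid * (T - mid) > d then gwcSearch T d lo mid
    else gwcSearch T d (mid + 1) hi
  else lo
termination_by (hi - lo).toNat
decreasing_by
  · have := PySem.Int.floordiv_two_mid_bounds (lo := lo) (hi := hi) (le_of_lt h)
    rw [PySem.Int.floordiv_eq_ediv_of_pos (by omega : (0:Int) < 2)] at *
    omega
  · have := PySem.Int.floordiv_two_mid_bounds (lo := lo) (hi := hi) (le_of_lt h)
    rw [PySem.Int.floordiv_eq_ediv_of_pos (by omega : (0:Int) < 2)] at *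
    omega

def get_winning_conditions_alt (total_time : Int) (current_distance : Int) : List Int :=
  if total_time < 0 then []
  else
    let m := PySem.Int.floordiv total_time 2
    if m * (total_time - m) ≤ current_distance then []
    else
      let lo := gwcSearch total_time current_distance 0 m
      PySem.List.pyRange lo (total_time - lo + 1) 1

-- ===== PRECONDITION & SPEC =====
def Spec_get_winning_conditions (total_time : Int) (current_distance : Int) (out : List Int) : Prop := out = get_winning_conditions_alt total_time current_distance
instance (total_time : Int) (current_distance : Int) (out : List Int) : Decidable (Spec_get_winning_conditions total_time current_distance out) := by unfold Spec_get_winning_conditions; infer_instance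

-- ===== CLAIM (what is proved, stated in full; the proofs are below) =====
def Claim_equal_get_winning_conditions : Prop := ∀ (total_time : Int) (current_distance : Int), Dom_get_winning_conditions total_time current_distance → Spec_get_winning_conditions total_time current_distance (get_winning_conditions total_time current_distance)

-- ===== LEMMAS AND PROOFS =====

-- strict monotonicity of b ↦ b*(T-b) on [0, T//2]
theorem gwc_mono {T a b : Int} (hab : a ≤ b) (hb : 2 * b ≤ T + 1) :
    a * (T - a) ≤ b * (T - b) := by
  rcases eq_or_lt_of_le hab with rfl | h
  · exact le_refl _
  · have h2 : 0 ≤ T - a - b := by omega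
    nlinarith [mul_nonneg (by omega : (0:Int) ≤ b - a) h2]

-- gwcSearch returns the least index in [lo,hi] whose distance beats d,
-- given the distance is beaten at hi and hi stays left of the vertex
theorem gwcSearch_spec (T d : Int) : ∀ (n : Nat) (lo hi : Int), (hi - lo).toNat ≤ n →
    lo ≤ hi → 2 * hi ≤ T + 1 → hi * (T - hi) > d →
    lo ≤ gwcSearch T d lo hi ∧ gwcSearch T d lo hi ≤ hi ∧
    gwcSearch T d lo hi * (T - gwcSearch T d lo hi) > d ∧
    (∀ b : Int, lo ≤ b → b < gwcSearch T d lo hi → ¬ b * (T - b) > d) := by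
  intro n
  induction n with
  | zero =>
    intro lo hi hn hle _ hhi
    have heq : lo = hi := by omega
    rw [gwcSearch]
    simp only [dif_neg (by omega : ¬ lo < hi)]
    exact ⟨le_refl _, hle, heq ▸ hhi, fun b hb hblt => absurd (lt_of_le_of_lt hb hblt) (lt_irrefl _)⟩
  | succ n ih =>
    intro lo hi hn hle hT hhi
    rw [gwcSearch]
    by_cases h : lo < hi
    · simp only [dif_pos h]
      have hme : PySem.Int.floordiv (lo + hi) 2 = (lo + hi) / 2 :=
        PySem.Int.floordiv_eq_ediv_of_pos (by omega)
      set mid := PySem.Int.floordiv (lo + hi) 2 with hmiddef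
      have hmlo : lo ≤ mid := by omega
      have hmhi : mid < hi := by omega
      by_cases hP : mid * (T - mid) > d
      · rw [if_pos hP]
        obtain ⟨h1, h2, h3, h4⟩ := ih lo mid (by omega) hmlo (by omega) hP
        exact ⟨h1, by omega, h3, h4⟩
      · rw [if_neg hP]
        obtain ⟨h1, h2, h3, h4⟩ := ih (mid + 1) hi (by omega) (by omega) hT hhi
        refine ⟨by omega, h2, h3, ?_⟩
        intro b hb hblt hPb
        rcases lt_or_ge b (mid + 1) with hc | hc
        · exact hP (lt_of_lt_of_le hPb (gwc_mono (by omega) (by omega)))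
        · exact h4 b hc hblt hPb
    · simp only [dif_neg h]
      have heq : lo = hi := by omega
      exact ⟨le_refl _, hle, heq ▸ hhi, fun b hb hblt => absurd (lt_of_le_of_lt hb hblt) (lt_irrefl _)⟩

-- ===== VERDICT (by name: the statement is the Claim_ definition above) =====
theorem get_winning_conditions_spec : Claim_equal_get_winning_conditions := by
  intro T d _
  unfold Spec_get_winning_conditions get_winning_conditions get_winning_conditions_alt
    get_distance_by_button_hold
  by_cases hT : T < 0
  · rw [if_pos hT, PySem.List.pyRange_one_eq_nil (by omega), List.filter_nil]
  · rw [if_neg hT]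
    have hme : PySem.Int.floordiv T 2 = T / 2 := PySem.Int.floordiv_eq_ediv_of_pos (by omega)
    set m := PySem.Int.floordiv T 2 with hmdef
    have hm0 : 0 ≤ m := by omega
    have hm2 : 2 * m ≤ T + 1 := by omega
    have hmT : m ≤ T := by omega
    by_cases hg : m * (T - m) ≤ d
    · rw [if_pos hg]
      apply List.filter_eq_nil_iff.2
      intro b hb
      rw [PySem.List.mem_pyRange_one] at hb
      simp only [decide_eq_true_eq, not_lt]
      rcases le_or_gt (2 * b) T with hc | hc
      · exact le_trans (gwc_mono (by omega : b ≤ m) hm2) hg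
      · calc b * (T - b) = (T - b) * (T - (T - b)) := by ring
          _ ≤ m * (T - m) := gwc_mono (by omega) hm2
          _ ≤ d := hg
    · rw [if_neg hg]
      obtain ⟨h1, h2, h3, h4⟩ := gwcSearch_spec T d (m - 0).toNat 0 m (le_refl _)
        hm0 hm2 (by omega)
      set r := gwcSearch T d 0 m with hrdef
      have key : ∀ b : Int, 0 ≤ b → b < T + 1 → (b * (T - b) > d ↔ (r ≤ b ∧ b < T - r + 1)) := by
        intro b hb0 hbT
        constructor
        · intro hPb
          constructor
          · by_contra hbr
            exact h4 b hb0 (by omega) hPb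
          · by_contra hbl
            refine h4 (T - b) (by omega) (by omega) ?_
            calc d < b * (T - b) := hPb
              _ = (T - b) * (T - (T - b)) := by ring
        · rintro ⟨hrb, hbr⟩
          rcases le_or_gt (2 * b) (T + 1) with hc | hc
          · exact lt_of_lt_of_le h3 (gwc_mono hrb hc)
          · calc d < r * (T - r) := h3
              _ ≤ (T - b) * (T - (T - b)) := gwc_mono (by omega) (by omega)
              _ = b * (T - b) := by ring
      rw [PySem.List.pyRange_one_append 0 r (T + 1) h1 (by omega),
        PySem.List.pyRange_one_append r (T - r + 1) (T + 1) (by omega) (by omega),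
        List.filter_append, List.filter_append]
      have e0 : (PySem.List.pyRange 0 r 1).filter (fun b => decide (b * (T - b) > d)) = [] := by
        apply List.filter_eq_nil_iff.2
        intro b hb
        rw [PySem.List.mem_pyRange_one] at hb
        simp only [decide_eq_true_eq]
        intro hPb
        exact absurd ((key b hb.1 (by omega)).1 hPb).1 (by omega)
      have e1 : (PySem.List.pyRange r (T - r + 1) 1).filter (fun b => decide (b * (T - b) > d))
          = PySem.List.pyRange r (T - r + 1) 1 := by
        apply List.filter_eq_self.2
        intro b hb
        rw [PySem.List.mem_pyRange_one] at hb
        simp only [decide_eq_true_eq]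
        exact (key b (by omega) (by omega)).2 ⟨hb.1, hb.2⟩
      have e2 : (PySem.List.pyRange (T - r + 1) (T + 1) 1).filter (fun b => decide (b * (T - b) > d)) = [] := by
        apply List.filter_eq_nil_iff.2
        intro b hb
        rw [PySem.List.mem_pyRange_one] at hb
        simp only [decide_eq_true_eq]
        intro hPb
        exact absurd ((key b (by omega) (by omega)).1 hPb).2 (by omega)
      rw [e0, e1, e2]
      simp
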